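-- pv_equiv track=rewrite | github.com/swidoff/codewars-python | string_func.py | string_func
-- ===== SOURCE A (Python) =====
-- def string_func(s, x):
--     if x == 0:
--         return s
--
--     n = len(s)
--     index_to_cycle_index = {}
--     remaining = set(range(n))
--     median = n // 2
--     while remaining:
--         cycle = []
--         i = remaining.pop()
--         j = 0
--         while i not in index_to_cycle_index:
--             cycle.append(i)
--             index_to_cycle_index[i] = (cycle, j)
--             remaining.discard(i)
--
--             if i < median:
--                 i = i * 2 + 1
--             else:
--                 i = (n - i - 1) * 2
--             j += 1
--
--     res = []
--     for i in range(n):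
--         cycle, start_idx = index_to_cycle_index[i]
--         end_idx = cycle[start_idx - x % len(cycle)]
--         res.append(s[end_idx])
--
--     return ''.join(res)
-- ===== SOURCE B (Python) =====
-- def string_func(s, x):
--     n = len(s)
--     half = n // 2
--
--     def step(k):
--         return 2 * k + 1 if k < half else 2 * (n - k - 1)
--
--     out = []
--     for i in range(n):
--         # length of i's cycle under `step`
--         length = 1
--         j = step(i)
--         while j != i:
--             j = step(j)
--             length += 1
--         # going back x steps on a cycle of this length = going forward (-x) mod length
--         j = i
--         for _ in range((-x) % length):
--             j = step(j)
--         out.append(s[j])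
--     return ''.join(out)
-- ===== Notes on version B (the rewrite author's own statement) =====
-- stated objective: simpler
-- what changed: Instead of building all cycles explicitly with a dict of shared mutable cycle lists and a shrinking set, B treats each position independently: it walks the shuffle map once around to find that position's cycle length L and then steps forward (-x) mod L times; no dict, set or cycle lists are kept, at the price of re-walking each cycle per position (B is slower on long strings).
import Mathlib
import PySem

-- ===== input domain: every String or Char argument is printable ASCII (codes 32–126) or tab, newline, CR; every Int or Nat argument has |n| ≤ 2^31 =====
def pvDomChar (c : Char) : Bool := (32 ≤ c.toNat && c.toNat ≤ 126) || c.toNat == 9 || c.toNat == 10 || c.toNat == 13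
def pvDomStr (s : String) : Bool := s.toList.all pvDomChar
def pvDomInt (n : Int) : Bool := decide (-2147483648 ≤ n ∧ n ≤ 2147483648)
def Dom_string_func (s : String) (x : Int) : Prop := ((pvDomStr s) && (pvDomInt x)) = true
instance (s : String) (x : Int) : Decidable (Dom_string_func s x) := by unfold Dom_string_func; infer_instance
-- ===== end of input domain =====

-- B replaces A's global cycle decomposition (dict of shared cycle lists + shrinking set) by an
-- independent per-position walk: find that position's cycle length L, then step forward (-x) mod L
-- times. Same return value everywhere; B is shorter and keeps no global state (not claimed faster).

-- ===== PORT A =====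
def pvNextA (n i : Nat) : Nat := if i < n / 2 then i * 2 + 1 else (n - i - 1) * 2

-- Python's inner `while i not in index_to_cycle_index`: the dict is "earlier cycles (D) plus the
-- members of the current, still-growing cycle list (cyc)", so the membership test is split into
-- `D.contains i || cyc.contains i`; the dict entries of the current cycle (which in Python hold a
-- reference to the shared mutable list) are written by the caller once the list is finished,
-- pairing member `i` with its position `j` (= cyc.zipIdx).  Fuel n+1 only makes the while loops
-- total; it is never exhausted on the reachable states.
def pvInnerA (n : Nat) (D : PySem.Dict Nat (List Nat × Nat)) :
    Nat → Nat → List Nat → PySem.Set Nat → List Nat × PySem.Set Nat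
  | 0, _, cyc, r => (cyc, r)
  | fuel+1, i, cyc, r =>
    if D.contains i || cyc.contains i then (cyc, r)
    else pvInnerA n D fuel (pvNextA n i) (cyc ++ [i]) (PySem.Set.discard r i)

-- `remaining.pop()` pops an unspecified element of a CPython set; the returned dict (hence A's
-- result) does not depend on which one, and the port pops the head.
def pvOuterA (n : Nat) :
    Nat → PySem.Set Nat → PySem.Dict Nat (List Nat × Nat) → PySem.Dict Nat (List Nat × Nat)
  | 0, _, D => D
  | fuel+1, r, D =>
    match r with
    | [] => D
    | i0 :: rtail =>
      let p := pvInnerA n D (n + 1) i0 [] rtail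
      pvOuterA n fuel p.2 (p.1.zipIdx.foldl (fun acc q => acc.insert q.1 (p.1, q.2)) D)

def string_func (s : String) (x : Int) : String :=
  if x = 0 then s
  else
    let cs := s.toList
    let n := cs.length
    let D := pvOuterA n (n + 1) (PySem.Set.ofList (List.range n)) PySem.Dict.empty
    String.ofList ((List.range n).map (fun i =>
      let e := D.getD i ([], 0)
      cs.getD (PySem.List.pyGetD e.1 ((e.2 : Int) - PySem.Int.mod x (e.1.length : Int)) 0) ' '))

-- ===== PORT B =====
def pvStepB (n half k : Nat) : Nat := if k < half then 2 * k + 1 else 2 * (n - k - 1)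

-- B's `while j != i` loop counting the cycle length (fuel n for totality; never exhausted).
def pvCycLenB (n half i : Nat) : Nat → Nat → Nat → Nat
  | 0, _, len => len
  | fuel+1, j, len => if j = i then len else pvCycLenB n half i fuel (pvStepB n half j) (len+1)

-- B's `for _ in range(t): j = step(j)` loop.
def pvWalkB (n half : Nat) : Nat → Nat → Nat
  | 0, j => j
  | t+1, j => pvWalkB n half t (pvStepB n half j)

def string_func_alt (s : String) (x : Int) : String :=
  let cs := s.toList
  let n := cs.length
  let half := n / 2
  String.ofList ((List.range n).map (fun i =>
    let len := pvCycLenB n half i n (pvStepB n half i) 1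
    cs.getD (pvWalkB n half ((PySem.Int.mod (-x) (len : Int)).toNat) i) ' '))

-- ===== PRECONDITION & SPEC =====
def Spec_string_func (s : String) (x : Int) (out : String) : Prop := out = string_func_alt s x
instance (s : String) (x : Int) (out : String) : Decidable (Spec_string_func s x out) := by unfold Spec_string_func; infer_instance

-- ===== CLAIM (what is proved, stated in full; the proofs are below) =====
def Claim_equal_string_func : Prop := ∀ (s : String) (x : Int), Dom_string_func s x → Spec_string_func s x (string_func s x)

-- ===== LEMMAS AND PROOFS =====

-- minimal period of i under the shuffle map pvNextA n
def pvMinPer (n i L : Nat) : Prop :=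
  0 < L ∧ (pvNextA n)^[L] i = i ∧ ∀ m, 0 < m → m < L → (pvNextA n)^[m] i ≠ i

-- the cycle list A builds from a starting point i0, as a pure expression
def pvOrbit (n i0 L : Nat) : List Nat := (List.range L).map (fun t => (pvNextA n)^[t] i0)

lemma pvNextA_lt {n i : Nat} (h : i < n) : pvNextA n i < n := by
  unfold pvNextA; split <;> omega

lemma pvIter_lt {n i : Nat} (h : i < n) : ∀ t, (pvNextA n)^[t] i < n := by
  intro t; induction t with
  | zero => simpa using h
  | succ t ih => rw [Function.iterate_succ_apply']; exact pvNextA_lt ih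

lemma pvNextA_inj {n i j : Nat} (hi : i < n) (hj : j < n) (h : pvNextA n i = pvNextA n j) : i = j := by
  unfold pvNextA at h; split_ifs at h <;> omega

lemma pvIter_cancel {n i j : Nat} (hi : i < n) (hj : j < n) :
    ∀ t, (pvNextA n)^[t] i = (pvNextA n)^[t] j → i = j := by
  intro t; induction t with
  | zero => intro h; simpa using h
  | succ t ih =>
    rw [Function.iterate_succ_apply', Function.iterate_succ_apply']
    intro h; exact ih (pvNextA_inj (pvIter_lt hi t) (pvIter_lt hj t) h)

lemma pvExists_period {n i : Nat} (h : i < n) :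
    ∃ L, 0 < L ∧ L ≤ n ∧ (pvNextA n)^[L] i = i := by
  have hmap : ∀ t : Fin (n+1), (pvNextA n)^[t.1] i < n := fun t => pvIter_lt h t.1
  obtain ⟨a, b, hne, heq⟩ := Fintype.exists_ne_map_eq_of_card_lt
    (fun t : Fin (n+1) => (⟨(pvNextA n)^[t.1] i, hmap t⟩ : Fin n)) (by simp)
  have heq' : (pvNextA n)^[a.1] i = (pvNextA n)^[b.1] i := congrArg Fin.val heq
  rcases Nat.lt_or_ge a.1 b.1 with hab | hab
  · refine ⟨b.1 - a.1, by omega, by omega, ?_⟩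
    have : (pvNextA n)^[a.1] ((pvNextA n)^[b.1-a.1] i) = (pvNextA n)^[a.1] i := by
      rw [← Function.iterate_add_apply]
      have : a.1 + (b.1 - a.1) = b.1 := by omega
      rw [this, heq']
    exact pvIter_cancel (pvIter_lt h _) h a.1 this
  · have hab' : b.1 < a.1 := by
      rcases Nat.lt_or_eq_of_le hab with h' | h'
      · exact h'
      · exact absurd (Fin.ext h'.symm) hne
    refine ⟨a.1 - b.1, by omega, by omega, ?_⟩
    have : (pvNextA n)^[b.1] ((pvNextA n)^[a.1-b.1] i) = (pvNextA n)^[b.1] i := by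
      rw [← Function.iterate_add_apply]
      have : b.1 + (a.1 - b.1) = a.1 := by omega
      rw [this, heq'.symm]
    exact pvIter_cancel (pvIter_lt h _) h b.1 this

lemma pvExists_minper {n i : Nat} (h : i < n) :
    ∃ L, pvMinPer n i L ∧ L ≤ n := by
  obtain ⟨L0, hL0, hLn, hLe⟩ := pvExists_period h
  have hex : ∃ m, 0 < m ∧ (pvNextA n)^[m] i = i := ⟨L0, hL0, hLe⟩
  refine ⟨Nat.find hex, ⟨(Nat.find_spec hex).1, (Nat.find_spec hex).2, ?_⟩, ?_⟩
  · intro m hm hmlt he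
    exact Nat.find_min hex hmlt ⟨hm, he⟩
  · exact le_trans (Nat.find_min' hex ⟨hL0, hLe⟩) hLn

lemma pvIter_mul {n i L : Nat} (hL : (pvNextA n)^[L] i = i) : ∀ q, (pvNextA n)^[L * q] i = i := by
  intro q; induction q with
  | zero => simp
  | succ q ih => rw [Nat.mul_succ, Function.iterate_add_apply, hL, ih]

lemma pvIter_mod {n i L : Nat} (hL : (pvNextA n)^[L] i = i) (_hL0 : 0 < L) (a : Nat) :
    (pvNextA n)^[a] i = (pvNextA n)^[a % L] i := by
  conv_lhs => rw [← Nat.div_add_mod a L]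
  rw [Nat.add_comm, Function.iterate_add_apply, pvIter_mul hL]

lemma pvPrefix_ne {n i L u v : Nat} (hm : pvMinPer n i L) (huv : u < v) (hv : v < L) :
    (pvNextA n)^[u] i ≠ (pvNextA n)^[v] i := by
  intro he
  have h1 : (pvNextA n)^[L - v] ((pvNextA n)^[u] i) = (pvNextA n)^[L - v] ((pvNextA n)^[v] i) :=
    congrArg _ he
  rw [← Function.iterate_add_apply, ← Function.iterate_add_apply] at h1
  have h2 : L - v + v = L := by omega
  rw [h2, hm.2.1] at h1
  exact hm.2.2 (L - v + u) (by omega) (by omega) h1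

lemma pvOrbit_nodup {n i L : Nat} (hm : pvMinPer n i L) : (pvOrbit n i L).Nodup := by
  unfold pvOrbit
  refine List.Nodup.map_on ?_ (List.nodup_range)
  intro u hu v hv he
  simp only [List.mem_range] at hu hv
  by_contra hne
  rcases Nat.lt_or_ge u v with h' | h'
  · exact pvPrefix_ne hm h' hv he
  · exact pvPrefix_ne hm (by omega) hu he.symm

lemma pvMinPer_shift {n i L j : Nat} (hm : pvMinPer n i L) :
    pvMinPer n ((pvNextA n)^[j] i) L := by
  obtain ⟨hL0, hLe, hmin⟩ := hm
  refine ⟨hL0, ?_, ?_⟩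
  · rw [← Function.iterate_add_apply, Nat.add_comm, Function.iterate_add_apply, hLe]
  · intro m hm0 hmL he
    rw [← Function.iterate_add_apply] at he
    set N := L * (j + 1) with hN
    have hNi : (pvNextA n)^[N] i = i := pvIter_mul hLe (j + 1)
    have hNj : j ≤ N := by
      have : 1 * (j + 1) ≤ L * (j + 1) := Nat.mul_le_mul_right _ hL0
      omega
    have h5 : (pvNextA n)^[N - j] ((pvNextA n)^[m + j] i)
        = (pvNextA n)^[N - j] ((pvNextA n)^[j] i) := congrArg _ he
    rw [← Function.iterate_add_apply, ← Function.iterate_add_apply] at h5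
    have e1 : N - j + (m + j) = m + N := by omega
    have e2 : N - j + j = N := by omega
    rw [e1, e2, hNi, Function.iterate_add_apply, hNi] at h5
    exact hmin m hm0 hmL h5

lemma pvMinPer_unique {n i L L' : Nat} (h1 : pvMinPer n i L) (h2 : pvMinPer n i L') : L = L' := by
  rcases h1 with ⟨h1p, h1e, h1m⟩; rcases h2 with ⟨h2p, h2e, h2m⟩
  by_contra hne
  rcases Nat.lt_or_ge L L' with h | h
  · exact h2m L h1p h h1e
  · exact h1m L' h2p (lt_of_le_of_ne h (fun e => hne e.symm)) h2e


lemma pvOrbit_not_in_keys {n i0 L : Nat} (D : PySem.Dict Nat (List Nat × Nat))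
    (hcl : ∀ k, D.contains k = true → D.contains (pvNextA n k) = true)
    (h0 : D.contains i0 = false) (hL : (pvNextA n)^[L] i0 = i0) (hL0 : 0 < L) :
    ∀ t, D.contains ((pvNextA n)^[t] i0) = false := by
  intro t
  by_contra hc
  have hc' : D.contains ((pvNextA n)^[t] i0) = true := by
    cases h : D.contains ((pvNextA n)^[t] i0) <;> simp_all
  have hstep : ∀ d, D.contains ((pvNextA n)^[t + d] i0) = true := by
    intro d; induction d with
    | zero => simpa using hc'
    | succ d ih =>
      have : t + (d + 1) = (t + d) + 1 := by omega
      rw [this, Function.iterate_succ_apply']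
      exact hcl _ ih
  have hmul : (pvNextA n)^[L * (t + 1)] i0 = i0 := pvIter_mul hL (t + 1)
  have hge : t ≤ L * (t + 1) := by
    have : 1 * (t + 1) ≤ L * (t + 1) := Nat.mul_le_mul_right _ hL0
    omega
  have := hstep (L * (t + 1) - t)
  rw [show t + (L * (t + 1) - t) = L * (t + 1) by omega, hmul] at this
  rw [this] at h0; exact Bool.true_eq_false.mp h0

-- ===== B-side loop characterisations =====
lemma pvStepB_eq {n k : Nat} : pvStepB n (n / 2) k = pvNextA n k := by
  unfold pvStepB pvNextA; split <;> ring

lemma pvWalkB_eq (n : Nat) : ∀ t j, pvWalkB n (n / 2) t j = (pvNextA n)^[t] j := by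
  intro t; induction t with
  | zero => intro j; rfl
  | succ t ih =>
    intro j
    show pvWalkB n (n / 2) t (pvStepB n (n / 2) j) = _
    rw [ih, pvStepB_eq, ← Function.iterate_succ_apply]


lemma pvCycLenB_aux {n i L : Nat} (hm : pvMinPer n i L) :
    ∀ fuel c, 0 < c → c ≤ L → L - c ≤ fuel →
      pvCycLenB n (n / 2) i fuel ((pvNextA n)^[c] i) c = L := by
  intro fuel; induction fuel with
  | zero =>
    intro c hc0 hcL hfc
    have : c = L := by omega
    subst this; rfl
  | succ fuel ih =>
    intro c hc0 hcL hfc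
    show (if (pvNextA n)^[c] i = i then c
          else pvCycLenB n (n / 2) i fuel (pvStepB n (n / 2) ((pvNextA n)^[c] i)) (c + 1)) = L
    by_cases he : (pvNextA n)^[c] i = i
    · rw [if_pos he]
      by_contra hne
      exact hm.2.2 c hc0 (by omega) he
    · rw [if_neg he]
      have hcL' : c < L := by
        rcases Nat.lt_or_eq_of_le hcL with h | h
        · exact h
        · exact absurd (h ▸ hm.2.1) he
      rw [pvStepB_eq, ← Function.iterate_succ_apply' (pvNextA n) c i]
      exact ih (c + 1) (by omega) (by omega) (by omega)

lemma pvCycLenB_spec {n i L : Nat} (hm : pvMinPer n i L) (hLn : L ≤ n) :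
    pvCycLenB n (n / 2) i n (pvStepB n (n / 2) i) 1 = L := by
  have := pvCycLenB_aux hm n 1 (by omega) hm.1 (by omega)
  rw [pvStepB_eq]
  simpa using this

-- ===== A-side loop characterisations =====
lemma pvMem_foldl_discard (l : List Nat) : ∀ (r : PySem.Set Nat) (y : Nat),
    y ∈ List.foldl PySem.Set.discard r l ↔ y ∈ r ∧ y ∉ l := by
  induction l with
  | nil => simp
  | cons a l ih =>
    intro r y
    simp only [List.foldl_cons, ih, PySem.Set.mem_discard, List.mem_cons]
    tauto

lemma pvFoldl_discard_sublist (l : List Nat) : ∀ (r : PySem.Set Nat),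
    (List.foldl PySem.Set.discard r l).Sublist r := by
  induction l with
  | nil => intro r; simp
  | cons a l ih =>
    intro r
    exact (ih _).trans (by unfold PySem.Set.discard; exact List.filter_sublist)


lemma pvInnerA_spec {n i0 L : Nat} (D : PySem.Dict Nat (List Nat × Nat))
    (hm : pvMinPer n i0 L)
    (hD : ∀ t, D.contains ((pvNextA n)^[t] i0) = false) :
    ∀ fuel c (r : PySem.Set Nat), c ≤ L → L - c < fuel →
      pvInnerA n D fuel ((pvNextA n)^[c] i0) ((List.range c).map (fun t => (pvNextA n)^[t] i0)) r
        = (pvOrbit n i0 L,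
           List.foldl PySem.Set.discard r ((List.range (L - c)).map (fun t => (pvNextA n)^[c + t] i0))) := by
  intro fuel; induction fuel with
  | zero => intro c r hcL hf; omega
  | succ fuel ih =>
    intro c r hcL hf
    by_cases hceq : c = L
    · subst hceq
      have hmem : ((List.range c).map (fun t => (pvNextA n)^[t] i0)).contains ((pvNextA n)^[c] i0) = true := by
        rw [List.contains_iff_mem, hm.2.1, List.mem_map]
        exact ⟨0, by simpa using hm.1, rfl⟩
      show (if _ then _ else _) = _
      rw [hmem, Bool.or_true, if_pos rfl]
      simp [pvOrbit]
    · have hcL' : c < L := by omega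
      have hD' : D.contains ((pvNextA n)^[c] i0) = false := hD c
      have hmem : ((List.range c).map (fun t => (pvNextA n)^[t] i0)).contains ((pvNextA n)^[c] i0) = false := by
        rw [← Bool.not_eq_true, List.contains_iff_mem, List.mem_map]
        rintro ⟨t, ht, he⟩
        rw [List.mem_range] at ht
        exact pvPrefix_ne hm ht hcL' he
      show (if _ then _ else _) = _
      rw [hD', hmem, Bool.or_self, if_neg (by simp)]
      rw [← Function.iterate_succ_apply' (pvNextA n) c i0,
          show (List.range c).map (fun t => (pvNextA n)^[t] i0) ++ [(pvNextA n)^[c] i0]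
             = (List.range (c+1)).map (fun t => (pvNextA n)^[t] i0) by
            rw [List.range_succ, List.map_append]; rfl]
      rw [ih (c+1) _ (by omega) (by omega)]
      congr 1
      have hsplit : L - c = (L - (c+1)) + 1 := by omega
      rw [hsplit, List.range_succ_eq_map, List.map_cons, List.map_map]
      rw [List.foldl_cons]
      have : PySem.Set.discard r ((pvNextA n)^[c + 0] i0) = PySem.Set.discard r ((pvNextA n)^[c] i0) := by
        norm_num
      rw [this]
      congr 1
      apply List.map_congr_left
      intro t _
      simp only [Function.comp_apply]
      congr 1
      omega

-- lookups after the zipIdx-insert fold that writes one finished cycle into the dict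
lemma pvGet?_foldl_insert_of_ne (c0 : List Nat) (k : Nat) :
    ∀ (l : List (Nat × Nat)) (D : PySem.Dict Nat (List Nat × Nat)), (∀ q ∈ l, q.1 ≠ k) →
      (l.foldl (fun acc q => acc.insert q.1 (c0, q.2)) D).get? k = D.get? k := by
  intro l; induction l with
  | nil => intro D _; rfl
  | cons a l ih =>
    intro D h
    simp only [List.foldl_cons]
    rw [ih _ (fun q hq => h q (List.mem_cons_of_mem a hq)),
        PySem.Dict.get?_insert_of_ne _ _ (Ne.symm (h a (List.mem_cons_self)))]


lemma pvFst_mem_zipIdx (l : List Nat) : ∀ (off : Nat) (q : Nat × Nat), q ∈ l.zipIdx off → q.1 ∈ l := by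
  induction l with
  | nil => simp
  | cons a l ih =>
    intro off q hq
    rw [List.zipIdx_cons, List.mem_cons] at hq
    rcases hq with h | h
    · subst h; exact List.mem_cons_self
    · exact List.mem_cons_of_mem _ (ih _ _ h)

lemma pvGet?_foldl_insert_self (c0 : List Nat) :
    ∀ (l : List Nat) (off : Nat) (D : PySem.Dict Nat (List Nat × Nat)) (j : Nat) (hj : j < l.length),
      l.Nodup →
      ((l.zipIdx off).foldl (fun acc q => acc.insert q.1 (c0, q.2)) D).get? l[j]
        = some (c0, j + off) := by
  intro l; induction l with
  | nil => intro off D j hj; simp at hj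
  | cons a l ih =>
    intro off D j hj hnd
    rw [List.zipIdx_cons, List.foldl_cons]
    have hne : ∀ q ∈ l.zipIdx (off + 1), q.1 ≠ a := by
      intro q hq
      have hql : q.1 ∈ l := pvFst_mem_zipIdx l _ q hq
      intro he; rw [he] at hql
      exact (List.nodup_cons.mp hnd).1 hql
    rcases j with _ | j'
    · simp only [List.getElem_cons_zero]
      rw [pvGet?_foldl_insert_of_ne _ _ _ _ hne, PySem.Dict.get?_insert_self]
      norm_num
    · simp only [List.getElem_cons_succ]
      rw [ih (off + 1) _ j' (by simpa using hj) (List.nodup_cons.mp hnd).2]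
      have : j' + (off + 1) = j' + 1 + off := by omega
      rw [this]

lemma pvContains_foldl_insert (c0 : List Nat) :
    ∀ (l : List (Nat × Nat)) (D : PySem.Dict Nat (List Nat × Nat)) (k : Nat),
      (l.foldl (fun acc q => acc.insert q.1 (c0, q.2)) D).contains k = true
        ↔ D.contains k = true ∨ k ∈ l.map (·.1) := by
  intro l; induction l with
  | nil => simp
  | cons a l ih =>
    intro D k
    simp only [List.foldl_cons, ih, PySem.Dict.contains_insert, List.map_cons, List.mem_cons]
    simp only [Bool.or_eq_true, beq_iff_eq]
    tauto

-- the dict produced by the outer loop: every index below n is mapped to its cycle and position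
def pvGoodEntry (n : Nat) (D : PySem.Dict Nat (List Nat × Nat)) (i : Nat) : Prop :=
  ∃ i0 L j, i0 < n ∧ pvMinPer n i0 L ∧ j < L ∧ i = (pvNextA n)^[j] i0 ∧
    D.get? i = some (pvOrbit n i0 L, j)

lemma pvMem_orbit {n i0 L k : Nat} :
    k ∈ pvOrbit n i0 L ↔ ∃ t, t < L ∧ (pvNextA n)^[t] i0 = k := by
  constructor
  · intro h
    obtain ⟨m, hm, he⟩ := by simpa [pvOrbit] using h
    exact ⟨m, hm, he.symm⟩
  · rintro ⟨t, ht, he⟩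
    exact List.mem_map.mpr ⟨t, by simpa using ht, he⟩

lemma pvOrbit_length {n i0 L : Nat} : (pvOrbit n i0 L).length = L := by simp [pvOrbit]

lemma pvOrbit_getElem {n i0 L j : Nat} (hj : j < L) :
    (pvOrbit n i0 L)[j]'(by simp [pvOrbit]; omega) = (pvNextA n)^[j] i0 := by
  simp [pvOrbit]

lemma pvOuterA_spec (n : Nat) :
    ∀ fuel (r : PySem.Set Nat) (D : PySem.Dict Nat (List Nat × Nat)),
      r.length ≤ fuel → r.Nodup →
      (∀ k, k ∈ r ↔ (k < n ∧ D.contains k = false)) →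
      (∀ k, D.contains k = true → D.contains (pvNextA n k) = true) →
      (∀ i, D.contains i = true → pvGoodEntry n D i) →
      ∀ i, i < n → pvGoodEntry n (pvOuterA n fuel r D) i := by
  intro fuel
  induction fuel with
  | zero =>
    intro r D hlen hnd hcomp hcl hgood i hi
    have hr : r = [] := List.eq_nil_of_length_eq_zero (by omega)
    subst hr
    have hci : D.contains i = true := by
      by_contra hc
      have hc' : D.contains i = false := by cases h : D.contains i <;> simp_all
      have : i ∈ ([] : List Nat) := (hcomp i).mpr ⟨hi, hc'⟩
      simp at this
    exact hgood i hci
  | succ fuel ih =>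
    intro r D hlen hnd hcomp hcl hgood i hi
    cases r with
    | nil =>
      have hci : D.contains i = true := by
        by_contra hc
        have hc' : D.contains i = false := by cases h : D.contains i <;> simp_all
        have : i ∈ ([] : List Nat) := (hcomp i).mpr ⟨hi, hc'⟩
        simp at this
      exact hgood i hci
    | cons i0 rtail =>
      obtain ⟨hi0n, hi0c⟩ := (hcomp i0).mp List.mem_cons_self
      obtain ⟨L, hm, hLn⟩ := pvExists_minper hi0n
      have hD : ∀ t, D.contains ((pvNextA n)^[t] i0) = false :=
        pvOrbit_not_in_keys D hcl hi0c hm.2.1 hm.1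
      have hinner := pvInnerA_spec D hm hD (n+1) 0 rtail (by omega) (by omega)
      have hp : pvInnerA n D (n+1) i0 [] rtail
          = (pvOrbit n i0 L, List.foldl PySem.Set.discard rtail (pvOrbit n i0 L)) := by
        simpa [pvOrbit] using hinner
      have hunf : pvOuterA n (fuel+1) (i0 :: rtail) D
          = pvOuterA n fuel (List.foldl PySem.Set.discard rtail (pvOrbit n i0 L))
              ((pvOrbit n i0 L).zipIdx.foldl
                (fun acc q => acc.insert q.1 (pvOrbit n i0 L, q.2)) D) := by
        show pvOuterA n fuel (pvInnerA n D (n+1) i0 [] rtail).2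
            ((pvInnerA n D (n+1) i0 [] rtail).1.zipIdx.foldl
              (fun acc q => acc.insert q.1 ((pvInnerA n D (n+1) i0 [] rtail).1, q.2)) D) = _
        rw [hp]
      rw [hunf]
      -- abbreviations
      have horbn : ∀ k, k ∈ pvOrbit n i0 L → k < n := by
        intro k hk
        obtain ⟨t, _, ht⟩ := pvMem_orbit.mp hk
        rw [← ht]; exact pvIter_lt hi0n t
      have horbD : ∀ k, k ∈ pvOrbit n i0 L → D.contains k = false := by
        intro k hk
        obtain ⟨t, _, ht⟩ := pvMem_orbit.mp hk
        rw [← ht]; exact hD t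
      have hi0orb : i0 ∈ pvOrbit n i0 L := pvMem_orbit.mpr ⟨0, hm.1, rfl⟩
      have hcont : ∀ k, ((pvOrbit n i0 L).zipIdx.foldl
            (fun acc q => acc.insert q.1 (pvOrbit n i0 L, q.2)) D).contains k = true
          ↔ D.contains k = true ∨ k ∈ pvOrbit n i0 L := by
        intro k
        rw [pvContains_foldl_insert]
        have : (pvOrbit n i0 L).zipIdx.map (·.1) = pvOrbit n i0 L := List.zipIdx_map_fst 0 _
        rw [this]
      refine ih _ _ ?_ ?_ ?_ ?_ ?_ i hi
      · calc (List.foldl PySem.Set.discard rtail (pvOrbit n i0 L)).length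
            ≤ rtail.length := (pvFoldl_discard_sublist _ _).length_le
          _ ≤ fuel := by simpa using Nat.succ_le_succ_iff.mp hlen
      · exact (pvFoldl_discard_sublist _ _).nodup (List.nodup_cons.mp hnd).2
      · intro k
        rw [pvMem_foldl_discard]
        constructor
        · rintro ⟨hkr, hko⟩
          have hk := (hcomp k).mp (List.mem_cons_of_mem _ hkr)
          refine ⟨hk.1, ?_⟩
          by_contra hc
          have : _ ∨ _ := (hcont k).mp (by cases h : ((pvOrbit n i0 L).zipIdx.foldl
            (fun acc q => acc.insert q.1 (pvOrbit n i0 L, q.2)) D).contains k <;> simp_all)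
          rcases this with h | h
          · rw [hk.2] at h; exact Bool.false_ne_true h
          · exact hko h
        · rintro ⟨hkn, hkc⟩
          have hDk : D.contains k = false := by
            by_contra hc
            have : D.contains k = true := by cases h : D.contains k <;> simp_all
            have := (hcont k).mpr (Or.inl this)
            rw [hkc] at this; exact Bool.false_ne_true this
          have hko : k ∉ pvOrbit n i0 L := by
            intro hk
            have := (hcont k).mpr (Or.inr hk)
            rw [hkc] at this; exact Bool.false_ne_true this
          have : k ∈ i0 :: rtail := (hcomp k).mpr ⟨hkn, hDk⟩
          rcases List.mem_cons.mp this with h | h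
          · exact absurd (h ▸ hi0orb) hko
          · exact ⟨h, hko⟩
      · intro k hk
        rcases (hcont k).mp hk with h | h
        · exact (hcont _).mpr (Or.inl (hcl k h))
        · obtain ⟨t, htL, ht⟩ := pvMem_orbit.mp h
          refine (hcont _).mpr (Or.inr ?_)
          rw [← ht, ← Function.iterate_succ_apply' (pvNextA n) t i0,
              pvIter_mod hm.2.1 hm.1 (t+1)]
          exact pvMem_orbit.mpr ⟨(t+1) % L, Nat.mod_lt _ hm.1, rfl⟩
      · intro k hk
        rcases (hcont k).mp hk with h | h
        · obtain ⟨a0, L', j', ha0, hm', hj', hke, hget⟩ := hgood k h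
          refine ⟨a0, L', j', ha0, hm', hj', hke, ?_⟩
          rw [pvGet?_foldl_insert_of_ne]
          · exact hget
          · intro q hq he
            have hq1 : q.1 ∈ pvOrbit n i0 L := pvFst_mem_zipIdx _ _ q hq
            have := horbD q.1 hq1
            rw [he, h] at this; exact Bool.true_eq_false.mp this
        · obtain ⟨j, hjL, hj⟩ := pvMem_orbit.mp h
          refine ⟨i0, L, j, hi0n, hm, hjL, hj.symm, ?_⟩
          have hlem := pvGet?_foldl_insert_self (pvOrbit n i0 L) (pvOrbit n i0 L) 0 D j
            (by rw [pvOrbit_length]; exact hjL) (pvOrbit_nodup hm)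
          rw [pvOrbit_getElem hjL, hj] at hlem
          simpa using hlem

-- ===== final assembly =====
lemma pvGoodEntry_init (n : Nat) :
    ∀ i, i < n →
      pvGoodEntry n (pvOuterA n (n + 1) (PySem.Set.ofList (List.range n)) PySem.Dict.empty) i := by
  have hr : PySem.Set.ofList (List.range n) = List.range n :=
    PySem.Set.ofList_eq_self_of_nodup _ List.nodup_range
  rw [hr]
  exact pvOuterA_spec n (n+1) (List.range n) PySem.Dict.empty
    (by simp) List.nodup_range
    (by intro k; simp [PySem.Dict.contains_empty, List.mem_range])
    (by intro k h; rw [PySem.Dict.contains_empty] at h; exact absurd h Bool.false_ne_true)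
    (by intro i h; rw [PySem.Dict.contains_empty] at h; exact absurd h Bool.false_ne_true)

lemma pvPerIndex (cs : List Char) (x : Int) {n i : Nat} (_hn : n = cs.length) (hi : i < n)
    (e : List Nat × Nat)
    (he : (pvOuterA n (n + 1) (PySem.Set.ofList (List.range n)) PySem.Dict.empty).getD i ([], 0) = e) :
    cs.getD (PySem.List.pyGetD e.1 ((e.2 : Int) - PySem.Int.mod x (e.1.length : Int)) 0) ' '
      = cs.getD (pvWalkB n (n / 2)
          ((PySem.Int.mod (-x) ((pvCycLenB n (n / 2) i n (pvStepB n (n / 2) i) 1 : Nat) : Int)).toNat) i) ' ' := by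
  obtain ⟨i0, L, j, hi0n, hm, hjL, hij, hget⟩ := pvGoodEntry_init n i hi
  have he' : e = (pvOrbit n i0 L, j) := by
    rw [← he]; unfold PySem.Dict.getD; rw [hget]; rfl
  subst he'
  -- L ≤ n
  obtain ⟨L2, hm2, hLn2⟩ := pvExists_minper hi0n
  have hLn : L ≤ n := (pvMinPer_unique hm hm2) ▸ hLn2
  have hmI : pvMinPer n i L := hij ▸ pvMinPer_shift (j := j) hm
  have hL0 : 0 < L := hm.1
  have hLpos : (0 : Int) < (L : Int) := by exact_mod_cast hL0
  have hLne : (L : Int) ≠ 0 := ne_of_gt hLpos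
  -- the A-side index
  simp only [pvOrbit_length]
  rw [PySem.Int.mod_eq_emod_of_pos hLpos]
  set idx : Int := (j : Int) - x % (L : Int) with hidx
  have hmod0 : 0 ≤ x % (L : Int) := Int.emod_nonneg x hLne
  have hmodL : x % (L : Int) < L := Int.emod_lt_of_pos x hLpos
  have hjL' : (j : Int) < L := by exact_mod_cast hjL
  have hlb : -(L : Int) < idx := by omega
  have hub : idx < L := by omega
  set kA : Nat := (idx % (L : Int)).toNat with hkA
  have hkAL : kA < L := by
    have h1 : idx % (L : Int) < L := Int.emod_lt_of_pos idx hLpos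
    have h2 : 0 ≤ idx % (L : Int) := Int.emod_nonneg idx hLne
    omega
  have hA : PySem.List.pyGetD (pvOrbit n i0 L) idx 0 = (pvNextA n)^[kA] i0 := by
    by_cases hpos : 0 ≤ idx
    · rw [PySem.List.pyGetD_eq_getElem _ 0 hpos (by rw [pvOrbit_length]; exact_mod_cast hub)]
      have : idx % (L : Int) = idx := Int.emod_eq_of_lt hpos hub
      have hk : kA = idx.toNat := by rw [hkA, this]
      rw [hk]
      exact pvOrbit_getElem (by omega)
    · set k : Nat := (-idx).toNat with hk
      have hk0 : 0 < k := by omega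
      have hkL : k ≤ L := by omega
      have hneg : -(k : Int) = idx := by omega
      rw [← hneg, PySem.List.pyGetD_neg_natCast _ k 0 hk0 (by rw [pvOrbit_length]; exact hkL)]
      have hmodv : idx % (L : Int) = idx + L := by
        have h3 : (idx + L) % (L : Int) = idx % (L : Int) :=
          Int.add_mul_emod_self_left idx (L : Int) 1 ▸ (by ring_nf)
        rw [← h3, Int.emod_eq_of_lt (by omega) (by omega)]
      have hkv : L - k = kA := by rw [hkA, hmodv]; omega
      simp only [pvOrbit_length, hkv]
      exact pvOrbit_getElem (by omega)
  rw [hA]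
  -- the B-side index
  rw [pvCycLenB_spec hmI hLn, pvWalkB_eq, PySem.Int.mod_eq_emod_of_pos hLpos]
  set tB : Nat := ((-x) % (L : Int)).toNat with htB
  have hiter : (pvNextA n)^[tB] i = (pvNextA n)^[tB + j] i0 := by
    rw [hij, ← Function.iterate_add_apply]
  rw [hiter]
  -- both exponents agree modulo L
  have hmodeq : kA = (tB + j) % L := by
    have hcast : (kA : Int) = ((tB + j) % L : Nat) := by
      have h1 : (kA : Int) = idx % (L : Int) :=
        Int.toNat_of_nonneg (Int.emod_nonneg idx hLne)
      have h2 : ((tB : Int)) = (-x) % (L : Int) :=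
        Int.toNat_of_nonneg (Int.emod_nonneg (-x) hLne)
      have h3 : (((tB + j) % L : Nat) : Int) = ((tB : Int) + (j : Int)) % (L : Int) := by
        push_cast; rfl
      rw [h1, h3, h2, hidx]
      have h4 : ((j : Int) - x % (L : Int)) % (L : Int) = ((j : Int) - x) % (L : Int) := by
        rw [Int.sub_emod, Int.emod_emod_of_dvd _ dvd_rfl, ← Int.sub_emod]
      have h5 : ((-x) % (L : Int) + (j : Int)) % (L : Int) = (-x + (j : Int)) % (L : Int) := by
        rw [Int.add_emod, Int.emod_emod_of_dvd _ dvd_rfl, ← Int.add_emod]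
      rw [h4, h5]
      congr 1
      ring
    exact_mod_cast hcast
  rw [pvIter_mod hm.2.1 hL0 (tB + j), ← hmodeq]

-- ===== VERDICT (by name: the statement is the Claim_ definition above) =====
lemma pvMap_getD_range (cs : List Char) :
    (List.range cs.length).map (fun i => cs.getD i ' ') = cs := by
  refine List.ext_getElem (by simp) ?_
  intro k h1 h2
  simp [List.getD_eq_getElem?_getD, List.getElem?_eq_getElem h2]

lemma pvAlt_zero (s : String) : string_func_alt s 0 = s := by
  unfold string_func_alt
  have hmap : (List.range s.toList.length).map (fun i =>
      s.toList.getD (pvWalkB s.toList.length (s.toList.length / 2)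
        ((PySem.Int.mod (-(0:Int))
          ((pvCycLenB s.toList.length (s.toList.length / 2) i s.toList.length
            (pvStepB s.toList.length (s.toList.length / 2) i) 1 : Nat) : Int)).toNat) i) ' ')
      = (List.range s.toList.length).map (fun i => s.toList.getD i ' ') := by
    apply List.map_congr_left
    intro i hi
    rw [List.mem_range] at hi
    obtain ⟨L, hm, hLn⟩ := pvExists_minper hi
    rw [pvCycLenB_spec hm hLn]
    have hLpos : (0 : Int) < (L : Int) := by exact_mod_cast hm.1
    rw [PySem.Int.mod_eq_emod_of_pos hLpos]
    norm_num [pvWalkB]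
  show String.ofList _ = s
  rw [hmap, pvMap_getD_range, String.ofList_toList]

-- ===== VERDICT (by name: the statement is the Claim_ definition above) =====
theorem string_func_spec : Claim_equal_string_func := by
  intro s x _
  unfold Spec_string_func
  by_cases hx : x = 0
  · subst hx
    rw [pvAlt_zero]
    unfold string_func
    rw [if_pos rfl]
  · unfold string_func string_func_alt
    rw [if_neg hx]
    show String.ofList _ = String.ofList _
    congr 1
    apply List.map_congr_left
    intro i hi
    rw [List.mem_range] at hi
    exact pvPerIndex s.toList x rfl hi _ rfl
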